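-- pv_equiv track=rewrite | github.com/sajjadhossanshimanto/leetcode | weekly/477/q1.py | sumAndMultiply
-- ===== SOURCE A (Python) =====
-- def sumAndMultiply(n: int) -> int:
--     new_num = 0
--     n_sum = 0
--     digit_count = 0
--
--     while n:
--         last_digit = n%10
--         n = n//10
--         if last_digit!=0:
--             new_num = new_num+last_digit*(10**digit_count)
--             n_sum += last_digit
--             digit_count+=1
--
--     return new_num*n_sum
-- ===== SOURCE B (Python) =====
-- def sumAndMultiply(n: int) -> int:
--     def go(m):
--         # returns (number formed by m's nonzero digits, sum of m's nonzero digits),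
--         # built big-endian by Horner steps on the way back up the recursion
--         if m == 0:
--             return (0, 0)
--         hi, s = go(m // 10)
--         d = m % 10
--         if d == 0:
--             return (hi, s)
--         return (hi * 10 + d, s + d)
--
--     num, s = go(n)
--     return num * s
-- ===== Notes on version B (the rewrite author's own statement) =====
-- stated objective: alternative
-- what changed: B replaces A's iterative little-endian accumulation (while-loop keeping new_num, a growing 10**digit_count place-value power and a running sum) by a recursive big-endian decomposition: go(n) recurses on n//10 first and combines on the way back up with a single Horner step hi*10+d, so no power of ten is ever computed and the digits are assembled in the opposite order.
import Mathlib
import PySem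

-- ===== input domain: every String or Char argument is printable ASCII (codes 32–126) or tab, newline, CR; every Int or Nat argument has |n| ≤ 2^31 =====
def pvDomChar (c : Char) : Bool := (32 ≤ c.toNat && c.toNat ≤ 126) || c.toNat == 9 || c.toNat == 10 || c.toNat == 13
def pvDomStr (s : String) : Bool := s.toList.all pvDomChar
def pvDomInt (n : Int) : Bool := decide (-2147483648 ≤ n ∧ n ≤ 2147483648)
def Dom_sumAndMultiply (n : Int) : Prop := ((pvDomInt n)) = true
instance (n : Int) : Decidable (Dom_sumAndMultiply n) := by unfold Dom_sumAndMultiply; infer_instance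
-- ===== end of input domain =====

-- B replaces A's iterative little-endian loop (with its 10**digit_count place-value
-- accumulator) by a recursive big-endian decomposition: recurse on n//10 first and
-- combine with one Horner step hi*10+d on the way back up (objective: alternative).


-- ===== PORT A =====
-- 'while n:' loop; the '≤' guard (instead of Python's exact-zero test) only makes the
-- recursion total: Python diverges on negative n, and such n are excluded by Pre_.
def sumAndMultiplyLoop (n new_num n_sum digit_count : Int) : Int :=
  if n ≤ 0 then new_num * n_sum
  else
    let last_digit := PySem.Int.mod n 10
    let n' := PySem.Int.floordiv n 10
    if last_digit ≠ 0 then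
      sumAndMultiplyLoop n' (new_num + last_digit * 10 ^ digit_count.toNat)
        (n_sum + last_digit) (digit_count + 1)
    else
      sumAndMultiplyLoop n' new_num n_sum digit_count
termination_by n.toNat
decreasing_by
  all_goals
    have hpos : 0 < n := by omega
    have h2 : PySem.Int.floordiv n 10 < n :=
      (PySem.Int.floordiv_lt_iff_lt_mul (a := n) (q := n) (b := 10) (by norm_num)).mpr
        (by nlinarith [hpos])
    omega

def sumAndMultiply (n : Int) : Int :=
  sumAndMultiplyLoop n 0 0 0

-- ===== PORT B =====
-- recursive helper go; the '≤' guard (instead of Python's 'm == 0') only makes the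
-- recursion total: Python's go recurses forever on negative m, excluded by Pre_.
def sumAndMultiplyGo (m : Int) : Int × Int :=
  if m ≤ 0 then (0, 0)
  else
    let p := sumAndMultiplyGo (PySem.Int.floordiv m 10)
    let d := PySem.Int.mod m 10
    if d = 0 then p else (p.1 * 10 + d, p.2 + d)
termination_by m.toNat
decreasing_by
  have hpos : 0 < m := by omega
  have h2 : PySem.Int.floordiv m 10 < m :=
    (PySem.Int.floordiv_lt_iff_lt_mul (a := m) (q := m) (b := 10) (by norm_num)).mpr
      (by nlinarith [hpos])
  omega

def sumAndMultiply_alt (n : Int) : Int :=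
  let p := sumAndMultiplyGo n
  p.1 * p.2

-- ===== PRECONDITION & SPEC =====
-- Pre_ excludes negative n, on which Python A never returns (the 'while n:' loop
-- with floor division diverges there; B's recursion does not terminate there either).
def Pre_sumAndMultiply (n : Int) : Prop := 0 ≤ n
instance (n : Int) : Decidable (Pre_sumAndMultiply n) := by unfold Pre_sumAndMultiply; infer_instance
def pvWitness_sumAndMultiply : Int := 1203

def Spec_sumAndMultiply (n : Int) (out : Int) : Prop := out = sumAndMultiply_alt n
instance (n : Int) (out : Int) : Decidable (Spec_sumAndMultiply n out) := by unfold Spec_sumAndMultiply; infer_instance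

-- ===== CLAIM (what is proved, stated in full; the proofs are below) =====
def Claim_equal_sumAndMultiply : Prop := ∀ (n : Int), Dom_sumAndMultiply n → Pre_sumAndMultiply n → Spec_sumAndMultiply n (sumAndMultiply n)

-- ===== LEMMAS AND PROOFS =====

-- little-endian value of an Int digit list (reference used by the proofs only)
def pvValLE (ds : List Int) : Int := ds.foldr (fun d a => d + 10 * a) 0

-- nonzero digits of m, little-endian, as Ints
def pvKeptI (m : Nat) : List Int :=
  ((Nat.digits 10 m).filter (fun d => d ≠ 0)).map (fun d => (d : Int))

theorem pvKeptI_zero : pvKeptI 0 = [] := by simp [pvKeptI]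

theorem pvKeptI_step (m : Nat) (hm : m ≠ 0) :
    pvKeptI m = if m % 10 = 0 then pvKeptI (m / 10)
      else ((m % 10 : Nat) : Int) :: pvKeptI (m / 10) := by
  have hdig : Nat.digits 10 m = m % 10 :: Nat.digits 10 (m / 10) :=
    Nat.digits_def' (by norm_num) (Nat.pos_of_ne_zero hm)
  by_cases hd : m % 10 = 0 <;> simp [pvKeptI, hdig, hd]

theorem pvLoopA_char (m : Nat) : ∀ (nn s : Int) (c : Nat),
    sumAndMultiplyLoop (m : Int) nn s (c : Int) =
      (nn + pvValLE (pvKeptI m) * 10 ^ c) * (s + (pvKeptI m).sum) := by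
  induction m using Nat.strong_induction_on with
  | _ m ih =>
    intro nn s c
    by_cases hm : m = 0
    · subst hm
      rw [sumAndMultiplyLoop]
      simp [pvKeptI_zero, pvValLE]
    · rw [sumAndMultiplyLoop]
      have hpos : 0 < m := Nat.pos_of_ne_zero hm
      have hm0 : ¬ ((m : Int) ≤ 0) := by
        have : (0 : Int) < (m : Int) := by exact_mod_cast hpos
        omega
      rw [if_neg hm0]
      have hlt : m / 10 < m := Nat.div_lt_self hpos (by norm_num)
      have hmod : PySem.Int.mod (m : Int) 10 = ((m % 10 : Nat) : Int) := by
        exact_mod_cast PySem.Int.mod_natCast m 10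
      have hdiv : PySem.Int.floordiv (m : Int) 10 = ((m / 10 : Nat) : Int) := by
        exact_mod_cast PySem.Int.floordiv_natCast m 10
      simp only [hmod, hdiv]
      by_cases hd : m % 10 = 0
      · rw [if_neg (by exact fun h => h (by exact_mod_cast hd))]
        rw [ih (m / 10) hlt nn s c]
        rw [pvKeptI_step m hm, if_pos hd]
      · rw [if_pos (fun h => hd (by exact_mod_cast h))]
        have hc1 : ((c : Int) + 1) = ((c + 1 : Nat) : Int) := by push_cast; ring
        rw [hc1, ih (m / 10) hlt _ _ (c + 1)]
        rw [pvKeptI_step m hm, if_neg hd]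
        simp only [pvValLE, List.foldr_cons, List.sum_cons, Int.toNat_natCast]
        rw [pow_succ]
        ring

theorem pvGo_char (m : Nat) :
    sumAndMultiplyGo (m : Int) = (pvValLE (pvKeptI m), (pvKeptI m).sum) := by
  induction m using Nat.strong_induction_on with
  | _ m ih =>
    by_cases hm : m = 0
    · subst hm
      rw [sumAndMultiplyGo]
      simp [pvKeptI_zero, pvValLE]
    · rw [sumAndMultiplyGo]
      have hpos : 0 < m := Nat.pos_of_ne_zero hm
      have hm0 : ¬ ((m : Int) ≤ 0) := by
        have : (0 : Int) < (m : Int) := by exact_mod_cast hpos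
        omega
      rw [if_neg hm0]
      have hlt : m / 10 < m := Nat.div_lt_self hpos (by norm_num)
      have hmod : PySem.Int.mod (m : Int) 10 = ((m % 10 : Nat) : Int) := by
        exact_mod_cast PySem.Int.mod_natCast m 10
      have hdiv : PySem.Int.floordiv (m : Int) 10 = ((m / 10 : Nat) : Int) := by
        exact_mod_cast PySem.Int.floordiv_natCast m 10
      simp only [hmod, hdiv, ih (m / 10) hlt]
      by_cases hd : m % 10 = 0
      · rw [if_pos (by exact_mod_cast hd)]
        rw [pvKeptI_step m hm, if_pos hd]
      · rw [if_neg (fun h => hd (by exact_mod_cast h))]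
        rw [pvKeptI_step m hm, if_neg hd]
        simp only [pvValLE, List.foldr_cons, List.sum_cons]
        rw [Prod.mk.injEq]
        constructor <;> ring

-- the two characterisations agree: A's value formula equals B's
theorem pvAB (m : Nat) : sumAndMultiply (m : Int) = sumAndMultiply_alt (m : Int) := by
  unfold sumAndMultiply sumAndMultiply_alt
  have h := pvLoopA_char m 0 0 0
  norm_num at h
  rw [h, pvGo_char m]

-- ===== VERDICT (by name: the statement is the Claim_ definition above) =====
theorem sumAndMultiply_spec : Claim_equal_sumAndMultiply := by
  intro n _ hpre
  unfold Spec_sumAndMultiply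
  replace hpre : 0 ≤ n := hpre
  obtain ⟨m, rfl⟩ : ∃ m : Nat, n = (m : Int) := ⟨n.toNat, (Int.toNat_of_nonneg hpre).symm⟩
  exact pvAB m
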